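-- pv_equiv track=rewrite | github.com/Nyakitoss/NKNB | news_analyzer.py | _group_news_by_topics
-- ===== SOURCE A (Python) =====
-- from typing import List, Dict
--
-- def _group_news_by_topics(news_items: List[Dict], topics: List[str]) -> Dict[str, List[Dict]]:
--     """Группирует новости по темам"""
--     grouped = {topic: [] for topic in topics}
--     topics_lower = [topic.lower() for topic in topics]
--
--     for news_item in news_items:
--         title = news_item.get("title", "").lower()
--         desc = news_item.get("description", "").lower()
--
--         for i, topic in enumerate(topics_lower):
--             if topic in title or topic in desc:
--                 grouped[topics[i]].append(news_item)
--                 break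
--
--     return grouped
-- ===== SOURCE B (Python) =====
-- def _group_news_by_topics(news_items, topics):
--     lows = [(t, t.lower()) for t in topics]
--
--     def first_match(item):
--         title = item.get("title", "").lower()
--         desc = item.get("description", "").lower()
--         return next((t for t, tl in lows if tl in title or tl in desc), None)
--
--     matched = [(item, first_match(item)) for item in news_items]
--     return {t: [item for item, m in matched if m == t] for t in dict.fromkeys(topics)}
-- ===== Notes on version B (the rewrite author's own statement) =====
-- stated objective: alternative
-- what changed: B computes each item's first matching topic once into a matched list and then builds the result by a grouping comprehension over deduplicated topics (per-topic filter), instead of A's incremental append into pre-seeded dict buckets with an inner break loop.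
import Mathlib
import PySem

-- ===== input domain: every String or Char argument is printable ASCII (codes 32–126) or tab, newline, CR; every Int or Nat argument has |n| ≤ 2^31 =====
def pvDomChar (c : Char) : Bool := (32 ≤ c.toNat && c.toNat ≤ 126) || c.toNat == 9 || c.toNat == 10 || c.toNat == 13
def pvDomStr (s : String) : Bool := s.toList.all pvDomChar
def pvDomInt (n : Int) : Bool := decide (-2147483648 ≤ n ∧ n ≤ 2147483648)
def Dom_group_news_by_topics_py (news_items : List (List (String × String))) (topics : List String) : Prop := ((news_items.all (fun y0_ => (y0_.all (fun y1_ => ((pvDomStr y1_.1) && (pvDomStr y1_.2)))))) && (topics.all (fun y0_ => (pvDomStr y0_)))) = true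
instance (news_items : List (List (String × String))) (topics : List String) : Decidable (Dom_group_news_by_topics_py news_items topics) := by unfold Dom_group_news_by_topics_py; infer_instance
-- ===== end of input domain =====

-- B groups by computing each item's first matching topic once and then building the
-- result per distinct topic by filtering, instead of A's incremental append into
-- pre-seeded dict buckets with an inner break loop; same cost, different decomposition.

-- ===== PORT A =====
-- inner 'for i, topic in enumerate(topics_lower): … grouped[topics[i]] … break'
-- rendered as a scan of zip(topics_lower, topics) returning the bucket key (exact:
-- both lists have equal length, so pairing lowered topic with its original is the
-- same pairing enumerate+index performs)
def pvFindA : List (String × String) → String → String → Option String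
  | [], _, _ => none
  | (tl, t) :: rest, title, desc =>
    if PySem.Str.isIn tl title || PySem.Str.isIn tl desc then some t
    else pvFindA rest title desc

def pvStepA (topics topicsLower : List String)
    (d : PySem.Dict String (List (List (String × String))))
    (news_item : List (String × String)) : PySem.Dict String (List (List (String × String))) :=
  let title := PySem.Str.lower ((PySem.Dict.mk news_item).getD "title" "")
  let desc := PySem.Str.lower ((PySem.Dict.mk news_item).getD "description" "")
  match pvFindA (topicsLower.zip topics) title desc with
  | none => d
  | some t => d.insert t (d.getD t [] ++ [news_item])

def group_news_by_topics_py (news_items : List (List (String × String))) (topics : List String) : List (String × List (List (String × String))) :=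
  let grouped := topics.foldl (fun d t => d.insert t ([] : List (List (String × String)))) PySem.Dict.empty
  let topicsLower := topics.map PySem.Str.lower
  (news_items.foldl (pvStepA topics topicsLower) grouped).items

-- ===== PORT B =====
def pvFirstMatchB : List (String × String) → String → String → Option String
  | [], _, _ => none
  | (t, tl) :: rest, title, desc =>
    if PySem.Str.isIn tl title || PySem.Str.isIn tl desc then some t
    else pvFirstMatchB rest title desc

def group_news_by_topics_py_alt (news_items : List (List (String × String))) (topics : List String) : List (String × List (List (String × String))) :=
  let lows := topics.map (fun t => (t, PySem.Str.lower t))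
  let matched := news_items.map (fun item =>
    (item, pvFirstMatchB lows
      (PySem.Str.lower ((PySem.Dict.mk item).getD "title" ""))
      (PySem.Str.lower ((PySem.Dict.mk item).getD "description" "")) ))
  (PySem.List.dedup topics).map (fun t =>
    (t, (matched.filter (fun p => p.2 == some t)).map (·.1)))

-- ===== PRECONDITION & SPEC =====
def Spec_group_news_by_topics_py (news_items : List (List (String × String))) (topics : List String) (out : List (String × List (List (String × String)))) : Prop := out = group_news_by_topics_py_alt news_items topics
instance (news_items : List (List (String × String))) (topics : List String) (out : List (String × List (List (String × String)))) : Decidable (Spec_group_news_by_topics_py news_items topics out) := by unfold Spec_group_news_by_topics_py; infer_instance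

-- ===== CLAIM (what is proved, stated in full; the proofs are below) =====
def Claim_equal_group_news_by_topics_py : Prop := ∀ (news_items : List (List (String × String))) (topics : List String), Dom_group_news_by_topics_py news_items topics → Spec_group_news_by_topics_py news_items topics (group_news_by_topics_py news_items topics)

-- ===== LEMMAS AND PROOFS =====

-- the two first-match scans agree
theorem pvFindA_eq_firstMatchB (ts : List String) (title desc : String) :
    pvFindA ((ts.map PySem.Str.lower).zip ts) title desc
      = pvFirstMatchB (ts.map (fun t => (t, PySem.Str.lower t))) title desc := by
  induction ts with
  | nil => rfl
  | cons t rest ih => simp [pvFindA, pvFirstMatchB, ih]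

-- a found topic is one of the scanned pairs' second components
theorem pvFindA_mem (ps : List (String × String)) (title desc t : String)
    (h : pvFindA ps title desc = some t) : t ∈ ps.map Prod.snd := by
  induction ps with
  | nil => simp [pvFindA] at h
  | cons p rest ih =>
    obtain ⟨tl, t'⟩ := p
    simp only [pvFindA] at h
    split at h
    · cases h; simp
    · exact List.mem_cons_of_mem _ (ih h)

-- seeding: 'grouped = {topic: [] for topic in topics}'
theorem seed_items (ts : List String) (d : PySem.Dict String (List (List (String × String)))) (ks : List String)
    (h : d.items = ks.map (fun t => (t, ([] : List (List (String × String)))))) :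
    (ts.foldl (fun d t => d.insert t ([] : List (List (String × String)))) d).items
      = (PySem.Set.update ks ts).map (fun t => (t, [])) := by
  induction ts generalizing d ks with
  | nil => simpa [PySem.Set.update] using h
  | cons t rest ih =>
    have hkeys : d.keys = ks := by
      simp [PySem.Dict.keys, h, List.map_map, Function.comp_def]
    rw [List.foldl_cons, PySem.Set.update_cons]
    by_cases hmem : t ∈ ks
    · have hc : d.contains t = true := (PySem.Dict.contains_iff_mem_keys d t).mpr (hkeys ▸ hmem)
      refine ih _ _ ?_
      rw [PySem.Dict.items_insert_of_contains d [] hc, h, List.map_map,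
          PySem.Set.add_of_mem hmem]
      refine List.map_congr_left fun x _ => ?_
      by_cases hx : x = t <;> simp [hx, Function.comp]
    · have hc : d.contains t = false := by
        have := PySem.Dict.contains_iff_mem_keys d t
        rw [hkeys] at this
        cases hcv : d.contains t
        · rfl
        · exact absurd (this.mp hcv) hmem
      refine ih _ _ ?_
      rw [PySem.Dict.items_insert_of_not_contains d [] hc, h,
          PySem.Set.add_of_not_mem hmem]
      simp

-- the main loop: appending each item to its first-matching bucket is per-topic filtering
theorem loop_items (M : List (String × String) → Option String)
    (l : List (List (String × String))) (ks : List String)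
    (d : PySem.Dict String (List (List (String × String))))
    (f : String → List (List (String × String)))
    (hnd : ks.Nodup)
    (hitems : d.items = ks.map (fun t => (t, f t)))
    (hmem : ∀ it ∈ l, ∀ t, M it = some t → t ∈ ks) :
    (l.foldl (fun d it =>
        match M it with
        | none => d
        | some t => d.insert t (d.getD t [] ++ [it])) d).items
      = ks.map (fun t => (t, f t ++ l.filter (fun it => M it == some t))) := by
  induction l generalizing d f with
  | nil => simpa using hitems
  | cons it l ih =>
    have hkeys : d.keys = ks := by
      simp [PySem.Dict.keys, hitems, List.map_map, Function.comp_def]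
    rw [List.foldl_cons]
    cases hM : M it with
    | none =>
      have hred : (match (none : Option String) with
          | none => d
          | some t => d.insert t (d.getD t [] ++ [it])) = d := rfl
      rw [hred]
      have := ih d f hitems (fun x hx t ht => hmem x (List.mem_cons_of_mem _ hx) t ht)
      rw [this]
      refine List.map_congr_left fun t _ => ?_
      simp [hM]
    | some t0 =>
      have hred : (match (some t0 : Option String) with
          | none => d
          | some t => d.insert t (d.getD t [] ++ [it])) = d.insert t0 (d.getD t0 [] ++ [it]) := rfl
      rw [hred]
      have ht0 : t0 ∈ ks := hmem it (List.mem_cons_self) t0 hM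
      have hc : d.contains t0 = true := (PySem.Dict.contains_iff_mem_keys d t0).mpr (hkeys ▸ ht0)
      have hndk : d.keys.Nodup := hkeys ▸ hnd
      have hin : (t0, f t0) ∈ d.items := by
        rw [hitems]; exact List.mem_map_of_mem ht0
      have hget : d.getD t0 [] = f t0 := PySem.Dict.getD_of_mem_items d hin hndk []
      have hnew : (d.insert t0 (d.getD t0 [] ++ [it])).items
          = ks.map (fun x => (x, if x = t0 then f x ++ [it] else f x)) := by
        rw [PySem.Dict.items_insert_of_contains d _ hc, hitems, List.map_map, hget]
        refine List.map_congr_left fun x _ => ?_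
        by_cases hx : x = t0 <;> simp [hx, Function.comp]
      rw [ih _ (fun x => if x = t0 then f x ++ [it] else f x) hnew
            (fun x hx t ht => hmem x (List.mem_cons_of_mem _ hx) t ht)]
      refine List.map_congr_left fun t _ => ?_
      by_cases hx : t = t0
      · subst hx
        simp [hM]
      · simp [hM, hx, Ne.symm hx]

-- ===== VERDICT (by name: the statement is the Claim_ definition above) =====
theorem group_news_by_topics_py_spec : Claim_equal_group_news_by_topics_py := by
  intro news_items topics _
  unfold Spec_group_news_by_topics_py
  simp only [group_news_by_topics_py, group_news_by_topics_py_alt]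
  have hded : PySem.List.dedup topics = PySem.Set.ofList topics := rfl
  have hseed := seed_items topics PySem.Dict.empty []
    (by simp [PySem.Dict.empty])
  rw [PySem.Set.update_nil_left] at hseed
  have hstep : pvStepA topics (topics.map PySem.Str.lower)
      = fun d it =>
          match pvFindA ((topics.map PySem.Str.lower).zip topics)
            (PySem.Str.lower ((PySem.Dict.mk it).getD "title" ""))
            (PySem.Str.lower ((PySem.Dict.mk it).getD "description" "")) with
          | none => d
          | some t => d.insert t (d.getD t [] ++ [it]) := rfl
  rw [hstep]
  rw [loop_items
      (fun it => pvFindA ((topics.map PySem.Str.lower).zip topics)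
        (PySem.Str.lower ((PySem.Dict.mk it).getD "title" ""))
        (PySem.Str.lower ((PySem.Dict.mk it).getD "description" "")))
      news_items (PySem.Set.ofList topics) _ (fun _ => [])
      (PySem.Set.nodup_ofList topics) hseed
      (fun it _ t ht => by
        have := pvFindA_mem _ _ _ _ ht
        rw [List.map_snd_zip (by simp)] at this
        exact (PySem.Set.mem_ofList topics t).mpr this)]
  rw [hded]
  refine List.map_congr_left fun t _ => ?_
  rw [List.filter_map, List.map_map]
  simp [Function.comp_def, pvFindA_eq_firstMatchB]
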